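-- pv_equiv track=rewrite | github.com/DevanandGit/finance | main.py | is_financial_question
-- ===== SOURCE A (Python) =====
-- def is_financial_question(question):
--     FINANCIAL_KEYWORDS = {
--         'invest', 'stock', 'bond', 'retirement', 'savings',
--         'tax', 'mortgage', 'loan', 'interest', 'portfolio',
--         'financial', 'money', 'wealth', 'income', 'expense'
--     }
--     question_lower = question.lower()
--     return any(keyword in question_lower for keyword in FINANCIAL_KEYWORDS)
-- ===== SOURCE B (Python) =====
-- def is_financial_question(question):
--     KEYWORDS = ('invest', 'stock', 'bond', 'retirement', 'savings',
--                 'tax', 'mortgage', 'loan', 'interest', 'portfolio',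
--                 'financial', 'money', 'wealth', 'income', 'expense')
--     q = question.lower()
--     # single left-to-right scan: at each position, test whether any keyword starts there
--     for i in range(len(q)):
--         for k in KEYWORDS:
--             if q.startswith(k, i):
--                 return True
--     return False
-- ===== Notes on version B (the rewrite author's own statement) =====
-- stated objective: alternative
-- what changed: B replaces A's fifteen independent whole-string substring searches (one per keyword) by a single left-to-right scan of the lowercased string that at each position tests whether some keyword starts there.
import Mathlib
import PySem

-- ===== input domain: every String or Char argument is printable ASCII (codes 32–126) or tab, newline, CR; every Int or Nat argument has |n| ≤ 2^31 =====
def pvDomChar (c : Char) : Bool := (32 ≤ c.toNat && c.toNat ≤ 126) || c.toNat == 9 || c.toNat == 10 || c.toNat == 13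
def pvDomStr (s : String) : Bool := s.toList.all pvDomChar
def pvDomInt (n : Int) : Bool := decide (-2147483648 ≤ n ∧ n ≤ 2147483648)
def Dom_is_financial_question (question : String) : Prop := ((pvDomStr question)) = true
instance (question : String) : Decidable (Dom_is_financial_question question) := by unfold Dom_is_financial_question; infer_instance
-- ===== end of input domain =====

-- B (alternative): one left-to-right scan of the lowercased string, testing at each position whether some keyword starts there, instead of A's fifteen independent substring searches.


-- ===== PORT A =====
-- the set literal's 15 keywords, in source order (any-over-a-set: order irrelevant to the result)
def pvKeywordsA : List String := ["invest", "stock", "bond", "retirement", "savings",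
  "tax", "mortgage", "loan", "interest", "portfolio",
  "financial", "money", "wealth", "income", "expense"]

def is_financial_question (question : String) : Bool :=
  let question_lower := PySem.Str.lower question
  pvKeywordsA.any (fun keyword => PySem.Str.isIn keyword question_lower)

-- ===== PORT B =====
def pvKeywordsB : List (List Char) := pvKeywordsA.map String.toList

-- the scan over positions i of q: does some keyword start at i?
def pvScanB (q : List Char) : Bool :=
  match q with
  | [] => false
  | _ :: rest => if pvKeywordsB.any (fun k => PySem.Chars.startswith q k) then true else pvScanB rest

def is_financial_question_alt (question : String) : Bool :=
  pvScanB (PySem.Str.lower question).toList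

-- ===== PRECONDITION & SPEC =====
def Spec_is_financial_question (question : String) (out : Bool) : Prop := out = is_financial_question_alt question
instance (question : String) (out : Bool) : Decidable (Spec_is_financial_question question out) := by unfold Spec_is_financial_question; infer_instance

-- ===== CLAIM (what is proved, stated in full; the proofs are below) =====
def Claim_equal_is_financial_question : Prop := ∀ (question : String), Dom_is_financial_question question → Spec_is_financial_question question (is_financial_question question)

-- ===== LEMMAS AND PROOFS =====
theorem pvScanB_iff (q : List Char) :
    pvScanB q = true ↔ ∃ k ∈ pvKeywordsB, ∃ j, k <+: q.drop j := by
  induction q with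
  | nil =>
    simp only [pvScanB]
    refine iff_of_false (by simp) ?_
    rintro ⟨k, hk, j, hp⟩
    have hknil : k = [] := List.prefix_nil.mp (by simpa using hp)
    subst hknil
    revert hk; decide
  | cons c rest ih =>
    have hcond : (pvKeywordsB.any (fun k => PySem.Chars.startswith (c :: rest) k) = true)
        ↔ ∃ k ∈ pvKeywordsB, k <+: c :: rest := by
      simp [List.any_eq_true, PySem.Chars.startswith_iff]
    rw [pvScanB]
    by_cases hs : ∃ k ∈ pvKeywordsB, k <+: c :: rest
    · rw [if_pos (hcond.mpr hs)]
      obtain ⟨k, hk, hp⟩ := hs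
      exact iff_of_true rfl ⟨k, hk, 0, by simpa using hp⟩
    · rw [if_neg (fun h => hs (hcond.mp h)), ih]
      constructor
      · rintro ⟨k, hk, j, hp⟩
        exact ⟨k, hk, j + 1, by simpa using hp⟩
      · rintro ⟨k, hk, j, hp⟩
        cases j with
        | zero => exact absurd ⟨k, hk, by simpa using hp⟩ hs
        | succ j => exact ⟨k, hk, j, by simpa using hp⟩

theorem pv_prefix_drop_iff_infix (k s : List Char) : (∃ j, k <+: s.drop j) ↔ k <:+: s := by
  constructor
  · rintro ⟨j, hp⟩
    exact hp.isInfix.trans (List.drop_suffix j s).isInfix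
  · rintro ⟨s₁, t, rfl⟩
    exact ⟨s₁.length, by simp⟩

-- ===== VERDICT (by name: the statement is the Claim_ definition above) =====
theorem is_financial_question_spec : Claim_equal_is_financial_question := by
  intro question _
  unfold Spec_is_financial_question is_financial_question is_financial_question_alt
  show pvKeywordsA.any (fun keyword => PySem.Str.isIn keyword (PySem.Str.lower question))
      = pvScanB (PySem.Str.lower question).toList
  rw [Bool.eq_iff_iff, pvScanB_iff]
  simp only [List.any_eq_true]
  constructor
  · rintro ⟨k, hk, hin⟩
    refine ⟨k.toList, List.mem_map_of_mem hk, ?_⟩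
    exact (pv_prefix_drop_iff_infix _ _).mpr ((PySem.Str.isIn_iff_infix _ _).mp hin)
  · rintro ⟨kl, hkl, hp⟩
    obtain ⟨k, hk, rfl⟩ := List.mem_map.mp hkl
    exact ⟨k, hk, (PySem.Str.isIn_iff_infix _ _).mpr ((pv_prefix_drop_iff_infix _ _).mp hp)⟩
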